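-- pv_equiv track=rewrite | github.com/Devjunku/TIL | python/programmers/Level1/폰켓몬.py | solution
-- ===== SOURCE A (Python) =====
-- def solution(nums):
--     N = int(len(nums)/2)
--
--     nums.sort()
--     pocket = {}
--     keys = []
--     for num in nums:
--         if num in pocket.keys():
--             pocket[num] += 1
--         else:
--             pocket[num] = 1
--             keys.append(num)
--
--     i = 0
--     key_n = len(keys)
--     answer = []
--     while i < key_n:
--         if keys[i] in answer or len(answer) >= N:
--             break
--         answer.append(keys[i])
--         i += 1
--
--     return len(answer)
-- ===== SOURCE B (Python) =====
-- def solution(nums):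
--     nums.sort()
--     if not nums:
--         return 0
--     distinct = 1
--     prev = nums[0]
--     for x in nums[1:]:
--         if x != prev:
--             distinct += 1
--         prev = x
--     return min(distinct, len(nums) // 2)
-- ===== Notes on version B (the rewrite author's own statement) =====
-- stated objective: faster
-- what changed: Replaces A's dict-and-keys bookkeeping plus a while loop that rebuilds an answer list with a quadratic 'in answer' membership scan by a single adjacent-comparison pass over the sorted list counting distinct values, returning min(distinct, len//2); both versions sort nums in place.
import Mathlib
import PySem

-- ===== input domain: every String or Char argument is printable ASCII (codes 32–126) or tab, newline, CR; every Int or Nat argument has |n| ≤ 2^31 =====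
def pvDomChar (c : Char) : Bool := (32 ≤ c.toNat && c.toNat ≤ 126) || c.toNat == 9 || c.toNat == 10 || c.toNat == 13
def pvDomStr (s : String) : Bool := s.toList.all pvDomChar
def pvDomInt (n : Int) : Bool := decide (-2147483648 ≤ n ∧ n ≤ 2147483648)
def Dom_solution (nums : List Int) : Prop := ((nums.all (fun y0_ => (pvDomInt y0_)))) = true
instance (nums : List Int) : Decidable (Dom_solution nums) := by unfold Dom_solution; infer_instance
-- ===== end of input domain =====

-- B replaces A's dict/keys bookkeeping and bounded while loop with one adjacent-comparison
-- pass over the sorted list, measurably faster since A's `in answer` scan is quadratic in the number of distinct values. Both A and B sort nums in place in Python;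
-- the equivalence proved here is about the return value.

-- ===== PORT A =====
-- the 'while i < key_n' loop: walks keys, appending to answer until a repeat or len(answer) >= N
def solutionWhile (N : Int) : List Int → List Int → List Int
  | [], ans => ans
  | k :: rest, ans =>
    if k ∈ ans ∨ (ans.length : Int) ≥ N then ans
    else solutionWhile N rest (ans ++ [k])

def solution (nums : List Int) : Int :=
  -- int(len(nums)/2): len(nums) ≥ 0, so float truncation equals floor division — exact here
  let N : Int := (nums.length : Int) / 2
  let s := PySem.List.sorted nums (fun x => x) false
  let st := s.foldl
    (fun (st : PySem.Dict Int Int × List Int) num =>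
      if st.1.contains num then (st.1.modify num 0 (· + 1), st.2)
      else (st.1.insert num 1, st.2 ++ [num]))
    (PySem.Dict.empty, [])
  ((solutionWhile N st.2 []).length : Int)

-- ===== PORT B =====
def solution_alt (nums : List Int) : Int :=
  let s := PySem.List.sorted nums (fun x => x) false
  match s with
  | [] => 0
  | x :: xs =>
    -- distinct = 1; prev = nums[0]; for x in nums[1:]: …
    let st := xs.foldl (fun (st : Int × Int) y =>
      (if y ≠ st.2 then st.1 + 1 else st.1, y)) ((1 : Int), x)
    min st.1 ((nums.length : Int) / 2)

-- ===== PRECONDITION & SPEC =====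
def Spec_solution (nums : List Int) (out : Int) : Prop := out = solution_alt nums
instance (nums : List Int) (out : Int) : Decidable (Spec_solution nums out) := by unfold Spec_solution; infer_instance

-- ===== CLAIM (what is proved, stated in full; the proofs are below) =====
def Claim_equal_solution : Prop := ∀ (nums : List Int), Dom_solution nums → Spec_solution nums (solution nums)

-- ===== LEMMAS AND PROOFS =====

-- number of adjacent changes, as computed by B's scan
def pvDcount : Int → List Int → Int
  | _, [] => 0
  | x, y :: ys => (if y ≠ x then 1 else 0) + pvDcount y ys

theorem pv_foldB_eq_dcount (xs : List Int) : ∀ (c x : Int),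
    (xs.foldl (fun (st : Int × Int) y => (if y ≠ st.2 then st.1 + 1 else st.1, y)) (c, x)).1
      = c + pvDcount x xs := by
  induction xs with
  | nil => intro c x; simp [pvDcount]
  | cons y ys ih =>
    intro c x
    simp only [List.foldl_cons, pvDcount]
    rw [ih]
    by_cases h : y = x <;> simp [h] <;> ring

theorem pv_dcount_card (xs : List Int) : ∀ x : Int, (x :: xs).Pairwise (· ≤ ·) →
    1 + pvDcount x xs = ((x :: xs).toFinset.card : Int) := by
  induction xs with
  | nil => intro x _; simp [pvDcount]
  | cons y ys ih =>
    intro x hp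
    have hxy : x ≤ y := (List.pairwise_cons.1 hp).1 y (by simp)
    have hp' : (y :: ys).Pairwise (· ≤ ·) := (List.pairwise_cons.1 hp).2
    by_cases h : y = x
    · subst h
      have : (y :: y :: ys).toFinset = (y :: ys).toFinset := by
        ext a; simp
      rw [this, ← ih y hp']
      simp [pvDcount]
    · have hlt : x < y := lt_of_le_of_ne hxy (fun e => h e.symm)
      have hxnot : x ∉ (y :: ys).toFinset := by
        simp only [List.mem_toFinset, List.mem_cons]
        rintro (rfl | hm)
        · exact h rfl
        · exact absurd ((List.pairwise_cons.1 hp').1 x hm) (not_le.2 hlt)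
      have hcard : ((x :: y :: ys).toFinset.card : Int)
          = 1 + ((y :: ys).toFinset.card : Int) := by
        rw [List.toFinset_cons, Finset.card_insert_of_notMem hxnot]
        push_cast; ring
      rw [hcard, ← ih y hp']
      simp [pvDcount, h]

-- invariant of A's dict-building fold: keys list stays duplicate-free, membership = seen
theorem pv_foldA_inv (l : List Int) : ∀ (d : PySem.Dict Int Int) (ks : List Int),
    ks.Nodup → (∀ z, z ∈ ks ↔ d.contains z = true) →
    (l.foldl (fun (st : PySem.Dict Int Int × List Int) num =>
        if st.1.contains num then (st.1.modify num 0 (· + 1), st.2)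
        else (st.1.insert num 1, st.2 ++ [num])) (d, ks)).2.Nodup ∧
    (∀ z, z ∈ (l.foldl (fun (st : PySem.Dict Int Int × List Int) num =>
        if st.1.contains num then (st.1.modify num 0 (· + 1), st.2)
        else (st.1.insert num 1, st.2 ++ [num])) (d, ks)).2 ↔ (z ∈ ks ∨ z ∈ l)) := by
  induction l with
  | nil => intro d ks hn hm; exact ⟨hn, fun z => by simp⟩
  | cons num rest ih =>
    intro d ks hn hm
    simp only [List.foldl_cons]
    by_cases hc : d.contains num = true
    · rw [if_pos hc]
      have := ih (d.modify num 0 (· + 1)) ks hn (fun z => by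
        rw [hm z, PySem.Dict.contains_modify]
        constructor
        · intro h1; simp [h1]
        · intro h1
          rcases Bool.or_eq_true_iff.1 h1 with h2 | h2
          · rw [beq_iff_eq.1 h2]; exact hc
          · exact h2)
      refine ⟨this.1, fun z => (this.2 z).trans ?_⟩
      constructor
      · rintro (hz | hz)
        · exact Or.inl hz
        · exact Or.inr (List.mem_cons_of_mem _ hz)
      · rintro (hz | hz)
        · exact Or.inl hz
        · rcases List.mem_cons.1 hz with rfl | hz
          · exact Or.inl ((hm z).2 hc)
          · exact Or.inr hz
    · rw [if_neg hc]
      have hnum : num ∉ ks := fun h => hc ((hm num).1 h)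
      have := ih (d.insert num 1) (ks ++ [num])
        (by
          rw [List.nodup_append]
          refine ⟨hn, List.nodup_singleton _, ?_⟩
          intro a ha b hb
          simp only [List.mem_cons, List.not_mem_nil, or_false] at hb
          subst hb
          exact fun e => hnum (e ▸ ha))
        (fun z => by
          rw [PySem.Dict.contains_insert]
          simp only [List.mem_append, List.mem_cons, hm z]
          constructor
          · rintro (hz | rfl | ⟨⟩) <;> simp_all
          · intro hz
            rcases Bool.or_eq_true_iff.1 hz with h1 | h2
            · exact Or.inr (by simpa using (beq_iff_eq.1 h1))
            · exact Or.inl h2)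
      refine ⟨this.1, fun z => (this.2 z).trans ?_⟩
      simp only [List.mem_append, List.mem_cons, List.not_mem_nil, or_false]
      tauto
  
theorem pv_whileA_len (N : Int) (keys : List Int) : ∀ (ans : List Int),
    keys.Nodup → (∀ k ∈ keys, k ∉ ans) →
    ((solutionWhile N keys ans).length : Int)
      = if (ans.length : Int) ≥ N then (ans.length : Int)
        else min ((ans.length : Int) + keys.length) N := by
  induction keys with
  | nil => intro ans _ _; simp [solutionWhile]; intro h; omega
  | cons k rest ih =>
    intro ans hn hdisj
    have hk : k ∉ ans := hdisj k (by simp)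
    simp only [solutionWhile]
    by_cases hN : (ans.length : Int) ≥ N
    · rw [if_pos (Or.inr hN), if_pos hN]
    · rw [if_neg (by tauto), if_neg hN]
      have hrest : ∀ j ∈ rest, j ∉ ans ++ [k] := by
        intro j hj
        simp only [List.mem_append, List.mem_singleton]
        rintro (hja | rfl)
        · exact hdisj j (List.mem_cons_of_mem _ hj) hja
        · exact (List.nodup_cons.1 hn).1 hj
      rw [ih (ans ++ [k]) (List.nodup_cons.1 hn).2 hrest]
      simp only [List.length_append, List.length_cons, List.length_nil]
      push_cast
      omega

-- ===== VERDICT (by name: the statement is the Claim_ definition above) =====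
theorem solution_spec : Claim_equal_solution := by
  unfold Claim_equal_solution
  intro nums _
  unfold Spec_solution solution solution_alt
  simp only []
  cases hs : PySem.List.sorted nums (fun x => x) false with
  | nil => simp [solutionWhile]
  | cons x xs =>
    dsimp only
    have hpw : (x :: xs).Pairwise (· ≤ ·) := by
      have := PySem.List.sorted_pairwise (xs := nums) (key := fun x => x) 
      rw [hs] at this
      exact this
    have hinv := pv_foldA_inv (x :: xs) PySem.Dict.empty []
      List.nodup_nil (fun z => by simp [PySem.Dict.contains_empty])
    set keys := ((x :: xs).foldl (fun (st : PySem.Dict Int Int × List Int) num =>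
        if st.1.contains num then (st.1.modify num 0 (· + 1), st.2)
        else (st.1.insert num 1, st.2 ++ [num])) (PySem.Dict.empty, [])).2 with hkeys
    have hklen : (keys.length : Int) = ((x :: xs).toFinset.card : Int) := by
      have hfin : keys.toFinset = (x :: xs).toFinset := by
        ext a; simp only [List.mem_toFinset]
        rw [hinv.2 a]; simp
      rw [← hfin, List.toFinset_card_of_nodup hinv.1]
    have hw := pv_whileA_len ((nums.length : Int) / 2) keys [] hinv.1 (by simp)
    have hfold := pv_foldB_eq_dcount xs 1 x
    have hd := pv_dcount_card xs x hpw
    have hcardpos : 1 ≤ ((x :: xs).toFinset.card : Int) := by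
      have : x ∈ (x :: xs).toFinset := by simp
      have := Finset.card_pos.2 ⟨x, this⟩
      omega
    have hNpos : 0 ≤ (nums.length : Int) / 2 := by positivity
    rw [hw, hfold]
    simp only [List.length_nil, Nat.cast_zero, zero_add]
    rw [hklen]
    omega
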